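-- pv_equiv track=rewrite | github.com/Serz999/MetroJourney | src/metro_journey/trip.py | count_color_transitions
-- ===== SOURCE A (Python) =====
-- def count_color_transitions(graph, path):
--     transitions = 0
--     for i in range(len(path) - 1):
--         start_vertex = path[i]
--         end_vertex = path[i+1]
--         start_color = graph[start_vertex][end_vertex]
--         if i < len(path) - 2:
--             next_vertex = path[i+2]
--             next_color = graph[end_vertex][next_vertex]
--             if start_color != next_color:
--                 transitions += 1
--     return transitions
-- ===== SOURCE B (Python) =====
-- def count_color_transitions(graph, path):
--     def color(i):
--         return graph[path[i]][path[i + 1]]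
--
--     def count(lo, hi):
--         # number of color transitions among the edges lo .. hi-1 of the path
--         if hi - lo < 2:
--             return 0
--         mid = (lo + hi) // 2
--         return count(lo, mid) + count(mid, hi) + (color(mid - 1) != color(mid))
--
--     return count(0, len(path) - 1)
-- ===== Notes on version B (the rewrite author's own statement) =====
-- stated objective: alternative
-- what changed: B counts transitions by divide-and-conquer on the edge-index interval: count(lo,hi) splits at mid=(lo+hi)//2, recurses on both halves and adds the single boundary comparison color(mid-1)!=color(mid), instead of A's left-to-right index loop that compares each edge color with the next (computing every edge color twice).
import Mathlib
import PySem

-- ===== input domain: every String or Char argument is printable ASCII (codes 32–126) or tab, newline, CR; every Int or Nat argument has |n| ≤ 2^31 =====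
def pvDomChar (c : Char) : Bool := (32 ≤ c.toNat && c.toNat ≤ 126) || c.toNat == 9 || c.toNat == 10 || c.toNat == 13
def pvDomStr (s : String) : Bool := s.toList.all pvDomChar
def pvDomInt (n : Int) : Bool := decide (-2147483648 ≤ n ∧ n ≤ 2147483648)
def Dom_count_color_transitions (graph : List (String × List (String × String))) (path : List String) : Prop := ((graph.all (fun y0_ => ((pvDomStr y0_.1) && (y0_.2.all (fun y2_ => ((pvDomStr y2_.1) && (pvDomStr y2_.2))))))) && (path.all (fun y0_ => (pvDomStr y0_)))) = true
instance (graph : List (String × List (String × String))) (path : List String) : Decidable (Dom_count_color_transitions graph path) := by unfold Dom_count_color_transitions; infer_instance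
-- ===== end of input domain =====

-- B replaces A's left-to-right index loop (each edge color computed twice) by a
-- divide-and-conquer on the edge-index interval with one boundary comparison per split;
-- return-value equivalence on all inputs where Python A returns (every path edge present).


-- ===== PORT A =====
def count_color_transitions (graph : List (String × List (String × String))) (path : List String) : Int :=
  (PySem.List.pyRange 0 ((path.length : Int) - 1) 1).foldl
    (fun transitions i =>
      let start_vertex := PySem.List.pyGetD path i ""
      let end_vertex := PySem.List.pyGetD path (i + 1) ""
      let start_color :=
        PySem.Dict.getD (PySem.Dict.mk (PySem.Dict.getD (PySem.Dict.mk graph) start_vertex [])) end_vertex ""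
      if i < (path.length : Int) - 2 then
        let next_vertex := PySem.List.pyGetD path (i + 2) ""
        let next_color :=
          PySem.Dict.getD (PySem.Dict.mk (PySem.Dict.getD (PySem.Dict.mk graph) end_vertex [])) next_vertex ""
        if start_color ≠ next_color then transitions + 1 else transitions
      else transitions)
    0

-- ===== PORT B =====
-- Source B's helper color(i) = graph[path[i]][path[i+1]]
def pvColorB (graph : List (String × List (String × String))) (path : List String) (i : Int) : String :=
  PySem.Dict.getD
    (PySem.Dict.mk (PySem.Dict.getD (PySem.Dict.mk graph) (PySem.List.pyGetD path i "") []))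
    (PySem.List.pyGetD path (i + 1) "") ""

-- Source B's recursive count(lo, hi): divide and conquer on the edge-index interval
def pvCountB (graph : List (String × List (String × String))) (path : List String) (lo hi : Int) : Int :=
  if h : hi - lo < 2 then 0
  else
    let mid := PySem.Int.floordiv (lo + hi) 2
    have hmid : lo + 1 ≤ mid ∧ mid ≤ hi - 1 := by
      constructor
      · rw [PySem.Int.le_floordiv_iff_mul_le (by omega : (0:Int) < 2)]; omega
      · have := PySem.Int.floordiv_lt_iff_lt_mul (a := lo + hi) (b := 2) (q := hi) (by omega)
        omega
    pvCountB graph path lo mid + pvCountB graph path mid hi +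
      (if pvColorB graph path (mid - 1) ≠ pvColorB graph path mid then 1 else 0)
termination_by (hi - lo).toNat
decreasing_by
  · omega
  · omega

def count_color_transitions_alt (graph : List (String × List (String × String))) (path : List String) : Int :=
  pvCountB graph path 0 ((path.length : Int) - 1)

-- ===== PRECONDITION & SPEC =====
-- Pre_ excludes exactly the inputs where Python A raises a KeyError: some consecutive pair
-- of path vertices has no edge recorded in graph.
def Pre_count_color_transitions (graph : List (String × List (String × String))) (path : List String) : Prop :=
  ((path.zip path.tail).all
    (fun uv =>
      ((PySem.Dict.mk graph).get? uv.1).any (fun adj => ((PySem.Dict.mk adj).get? uv.2).isSome))) = true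
instance (graph : List (String × List (String × String))) (path : List String) : Decidable (Pre_count_color_transitions graph path) := by unfold Pre_count_color_transitions; infer_instance

def pvWitness_count_color_transitions : (List (String × List (String × String))) × List String :=
  ([("a", [("b", "red")]), ("b", [("c", "blue")])], ["a", "b", "c"])

def Spec_count_color_transitions (graph : List (String × List (String × String))) (path : List String) (out : Int) : Prop := out = count_color_transitions_alt graph path
instance (graph : List (String × List (String × String))) (path : List String) (out : Int) : Decidable (Spec_count_color_transitions graph path out) := by unfold Spec_count_color_transitions; infer_instance

-- ===== CLAIM (what is proved, stated in full; the proofs are below) =====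
def Claim_equal_count_color_transitions : Prop := ∀ (graph : List (String × List (String × String))) (path : List String), Dom_count_color_transitions graph path → Pre_count_color_transitions graph path → Spec_count_color_transitions graph path (count_color_transitions graph path)

-- ===== LEMMAS AND PROOFS =====

-- the reference count: transitions among the edges lo .. hi-1, as a countP over an index range
def pvSpecCount (graph : List (String × List (String × String))) (path : List String) (lo hi : Int) : Int :=
  ((List.range (hi - lo - 1).toNat).countP
    (fun j : Nat => pvColorB graph path (lo + (j : Int)) ≠ pvColorB graph path (lo + (j : Int) + 1)) : Int)

-- splitting the reference count at an interior point mid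
theorem pvSpec_split (graph : List (String × List (String × String))) (path : List String)
    (lo mid hi : Int) (h1 : lo + 1 ≤ mid) (h2 : mid ≤ hi - 1) :
    pvSpecCount graph path lo hi
      = pvSpecCount graph path lo mid + pvSpecCount graph path mid hi
        + (if pvColorB graph path (mid - 1) ≠ pvColorB graph path mid then 1 else 0) := by
  unfold pvSpecCount
  have hL : (hi - lo - 1).toNat = ((mid - lo - 1).toNat + 1) + (hi - mid - 1).toNat := by omega
  rw [hL, List.range_add, List.countP_append, List.countP_map, List.range_succ, List.countP_append]
  have e1 : lo + ((mid - lo - 1).toNat : Int) = mid - 1 := by omega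
  have e2 : lo + ((mid - lo - 1).toNat : Int) + 1 = mid := by omega
  have hmidp : List.countP
      (fun j : Nat => decide (pvColorB graph path (lo + (j : Int)) ≠ pvColorB graph path (lo + (j : Int) + 1)))
      [(mid - lo - 1).toNat]
      = if pvColorB graph path (mid - 1) ≠ pvColorB graph path mid then 1 else 0 := by
    rw [List.countP_cons, List.countP_nil, Nat.zero_add, e2, e1]
    by_cases hc : pvColorB graph path (mid - 1) ≠ pvColorB graph path mid <;> simp [hc]
  have hright : List.countP
      ((fun j : Nat => decide (pvColorB graph path (lo + (j : Int)) ≠ pvColorB graph path (lo + (j : Int) + 1)))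
        ∘ fun x => (mid - lo - 1).toNat + 1 + x)
      (List.range (hi - mid - 1).toNat)
      = List.countP
        (fun j : Nat => decide (pvColorB graph path (mid + (j : Int)) ≠ pvColorB graph path (mid + (j : Int) + 1)))
        (List.range (hi - mid - 1).toNat) := by
    apply List.countP_congr
    intro j _
    simp only [Function.comp]
    have ej : lo + (((mid - lo - 1).toNat + 1 + j : Nat) : Int) = mid + j := by push_cast; omega
    rw [ej]
  rw [hmidp, hright]
  push_cast
  ring

-- Source B's divide-and-conquer computes the reference count
theorem pvCountB_eq_spec (graph : List (String × List (String × String))) (path : List String)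
    (d : Nat) : ∀ (lo hi : Int), (hi - lo).toNat = d →
    pvCountB graph path lo hi = pvSpecCount graph path lo hi := by
  induction d using Nat.strong_induction_on with
  | _ d ih =>
    intro lo hi hd
    rw [pvCountB]
    split_ifs with h
    · have h0 : (hi - lo - 1).toNat = 0 := by omega
      simp [pvSpecCount, h0]
    · have h1 : lo + 1 ≤ PySem.Int.floordiv (lo + hi) 2 := by
        rw [PySem.Int.le_floordiv_iff_mul_le (by omega : (0:Int) < 2)]; omega
      have h2 : PySem.Int.floordiv (lo + hi) 2 ≤ hi - 1 := by
        have := PySem.Int.floordiv_lt_iff_lt_mul (a := lo + hi) (b := 2) (q := hi) (by omega)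
        omega
      show pvCountB graph path lo (PySem.Int.floordiv (lo + hi) 2)
          + pvCountB graph path (PySem.Int.floordiv (lo + hi) 2) hi
          + (if pvColorB graph path (PySem.Int.floordiv (lo + hi) 2 - 1)
                ≠ pvColorB graph path (PySem.Int.floordiv (lo + hi) 2) then 1 else 0)
        = pvSpecCount graph path lo hi
      rw [ih (PySem.Int.floordiv (lo + hi) 2 - lo).toNat (by omega) lo _ rfl,
          ih (hi - PySem.Int.floordiv (lo + hi) 2).toNat (by omega) _ hi rfl]
      exact (pvSpec_split graph path lo _ hi h1 h2).symm

-- A's index loop computes the reference count over the whole edge interval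
theorem A_eq_spec (graph : List (String × List (String × String))) (path : List String) :
    count_color_transitions graph path = pvSpecCount graph path 0 ((path.length : Int) - 1) := by
  unfold count_color_transitions
  rw [PySem.List.pyRange_one]
  simp only [sub_zero]
  set n : Int := (path.length : Int) with hn
  set m : Nat := (n - 1).toNat with hm
  rw [List.foldl_map]
  have hfun : (fun (transitions : Int) (k : Nat) =>
        (fun transitions (i : Int) =>
          let start_vertex := PySem.List.pyGetD path i ""
          let end_vertex := PySem.List.pyGetD path (i + 1) ""
          let start_color :=
            PySem.Dict.getD (PySem.Dict.mk (PySem.Dict.getD (PySem.Dict.mk graph) start_vertex [])) end_vertex ""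
          if i < n - 2 then
            let next_vertex := PySem.List.pyGetD path (i + 2) ""
            let next_color :=
              PySem.Dict.getD (PySem.Dict.mk (PySem.Dict.getD (PySem.Dict.mk graph) end_vertex [])) next_vertex ""
            if start_color ≠ next_color then transitions + 1 else transitions
          else transitions) transitions ((0 : Int) + (k : Int)))
      = (fun (transitions : Int) (k : Nat) =>
          if ((k : Int) < n - 2 ∧ pvColorB graph path (k : Int) ≠ pvColorB graph path ((k : Int) + 1)) then
            transitions + 1 else transitions) := by
    funext transitions k
    simp only [zero_add, pvColorB, show (k:Int) + 1 + 1 = (k:Int) + 2 from by ring]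
    by_cases hk : (k : Int) < n - 2
    · simp only [hk, if_true, true_and]
    · simp [hk]
  rw [hfun, PySem.List.foldl_ite_add_one]
  simp only [zero_add]
  unfold pvSpecCount
  simp only [zero_add, sub_zero]
  norm_cast
  have hm' : (n - 1 - 1).toNat = m - 1 := by omega
  rw [hm']
  cases Nat.eq_zero_or_pos m with
  | inl h0 => simp [h0]
  | inr hpos =>
    have hms : m = (m - 1) + 1 := (Nat.succ_pred_eq_of_pos hpos).symm
    conv_lhs => rw [hms, List.range_succ]
    rw [List.countP_append]
    have hlast : List.countP
        (fun k : Nat => decide ((k : Int) < n - 2 ∧ ¬ pvColorB graph path (k : Int) = pvColorB graph path ((k + 1 : Nat) : Int)))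
        [m - 1] = 0 := by
      have hnot : ¬ ((m - 1 : Nat) : Int) < n - 2 := by omega
      simp [hnot]
    rw [hlast, Nat.add_zero]
    apply List.countP_congr
    intro k hk
    have hkm : k < m - 1 := List.mem_range.mp hk
    have hklt : (k : Int) < n - 2 := by omega
    simp [hklt]

-- ===== VERDICT (by name: the statement is the Claim_ definition above) =====
theorem count_color_transitions_spec : Claim_equal_count_color_transitions := by
  intro graph path _ _
  unfold Spec_count_color_transitions count_color_transitions_alt
  rw [A_eq_spec, pvCountB_eq_spec graph path ((((path.length : Int) - 1) - 0).toNat) 0 _ rfl]
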